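-- pv_equiv track=rewrite | github.com/EleutherAI/lm_perplexity | lm_perplexity/utils.py | get_rolling_token_windows
-- ===== SOURCE A (Python) =====
-- def get_rolling_token_windows(token_list, prefix_token, max_seq_len, context_len):
--     """
--     - context_len allows for a rolling window context, allowing each prediction window to potentially
--       condition on some context
--
--     :param token_list: list
--         List of tokens to be PREDICTED
--     :param max_seq_len: int
--         max_seq_len of model (or max_seq_len we want to use)
--     :param context_len: int
--         Amount of desired token context for prediction. Needs to be at least 1.
--     :param prefix_token: token
--         Dummy token like <eos> so the first token has something to condition on
--     :return: generator
--         Generator of tuples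
--             (input_tokens, pred_tokens)
--         Note: Score only the last len(pred_tokens) logits of the LM
--     """
--     assert 1 <= context_len <= max_seq_len
--     # +1 offset, going from input->preds
--     pred_len = max_seq_len - context_len + 1
--     predicted = 0
--
--     # Special handling for first window: predict all tokens
--     first_seq_len = min(max_seq_len, len(token_list))
--     yield (
--         [prefix_token] + token_list[:first_seq_len - 1],
--         token_list[:first_seq_len]
--     )
--     predicted += first_seq_len
--
--     while predicted < len(token_list):
--         window_pred_len = min(len(token_list) - predicted, pred_len)
--         window_end = predicted + window_pred_len
--         yield (
--             token_list[window_end - max_seq_len - 1:window_end - 1],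
--             token_list[window_end - window_pred_len:window_end],
--         )
--         predicted += window_pred_len
-- ===== SOURCE B (Python) =====
-- def get_rolling_token_windows(token_list, prefix_token, max_seq_len, context_len):
--     assert 1 <= context_len <= max_seq_len
--     pred_len = max_seq_len - context_len + 1
--     first = min(max_seq_len, len(token_list))
--     windows = [([prefix_token] + token_list[:first - 1], token_list[:first])]
--     # Streaming pass: consume the remaining tokens in chunks of pred_len, carrying
--     # only a bounded context buffer; no absolute-index arithmetic.
--     context = token_list[:first]
--     rest = token_list[first:]
--     while rest:
--         chunk, rest = rest[:pred_len], rest[pred_len:]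
--         full = context + chunk
--         windows.append((full[:-1][-max_seq_len:], chunk))
--         context = full[-max_seq_len:]
--     return windows
-- ===== Notes on version B (the rewrite author's own statement) =====
-- stated objective: alternative
-- what changed: A computes each window by absolute-index slicing of token_list driven by a mutating 'predicted' counter; B instead streams over the tokens, consuming the remainder chunk by chunk while carrying only a bounded context buffer (context + chunk gives the window; the buffer is re-trimmed to the last max_seq_len tokens), so no absolute index arithmetic appears.
import Mathlib
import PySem

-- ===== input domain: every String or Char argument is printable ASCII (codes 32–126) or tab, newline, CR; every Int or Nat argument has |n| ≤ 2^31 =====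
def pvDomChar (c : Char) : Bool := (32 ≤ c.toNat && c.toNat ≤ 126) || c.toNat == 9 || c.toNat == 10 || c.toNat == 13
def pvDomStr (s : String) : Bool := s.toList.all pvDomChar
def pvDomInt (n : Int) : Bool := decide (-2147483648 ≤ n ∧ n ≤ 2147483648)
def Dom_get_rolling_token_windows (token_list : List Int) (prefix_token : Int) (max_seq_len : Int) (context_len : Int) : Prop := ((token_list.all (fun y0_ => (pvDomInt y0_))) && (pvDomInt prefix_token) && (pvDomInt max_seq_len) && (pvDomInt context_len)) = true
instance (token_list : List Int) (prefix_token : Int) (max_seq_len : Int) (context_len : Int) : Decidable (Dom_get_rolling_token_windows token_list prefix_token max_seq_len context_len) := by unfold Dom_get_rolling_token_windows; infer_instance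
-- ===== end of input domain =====

-- B replaces A's absolute-index slicing driven by a mutating 'predicted' counter with a
-- streaming pass that consumes the remaining tokens chunk by chunk, carrying a bounded
-- context buffer (objective: alternative; same cost). A is a generator; equivalence is
-- about the full yielded sequence (no argument is mutated).

-- ===== PORT A =====
-- A's while-loop: state is 'predicted'; fuel = token_list.length suffices since each
-- iteration advances 'predicted' by at least 1 (pred_len ≥ 1 under Pre_).
def grtwLoop (tl : List Int) (msl pred_len predicted : Int) : Nat → List (List Int × List Int)
  | 0 => []
  | fuel+1 =>
    if predicted < (tl.length : Int) then
      let wpl := min ((tl.length : Int) - predicted) pred_len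
      let we := predicted + wpl
      (PySem.List.slice tl (some (we - msl - 1)) (some (we - 1)),
       PySem.List.slice tl (some (we - wpl)) (some we)) :: grtwLoop tl msl pred_len we fuel
    else []

def get_rolling_token_windows (token_list : List Int) (prefix_token : Int) (max_seq_len : Int) (context_len : Int) : List (List Int × List Int) :=
  let pred_len := max_seq_len - context_len + 1
  let first_seq_len := min max_seq_len (token_list.length : Int)
  (prefix_token :: PySem.List.slice token_list none (some (first_seq_len - 1)),
   PySem.List.slice token_list none (some first_seq_len)) ::
  grtwLoop token_list max_seq_len pred_len first_seq_len token_list.length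

-- ===== PORT B =====
-- B's streaming loop: state is (context, rest); fuel = rest.length suffices since each
-- iteration strictly shortens rest (pred_len ≥ 1 under Pre_).
def grtwStream (msl pred_len : Int) (context rest : List Int) : Nat → List (List Int × List Int)
  | 0 => []
  | fuel+1 =>
    if rest = [] then []
    else
      let chunk := PySem.List.slice rest none (some pred_len)
      let rest' := PySem.List.slice rest (some pred_len) none
      let full := context ++ chunk
      (PySem.List.slice (PySem.List.slice full none (some (-1))) (some (-msl)) none, chunk)
        :: grtwStream msl pred_len (PySem.List.slice full (some (-msl)) none) rest' fuel

def get_rolling_token_windows_alt (token_list : List Int) (prefix_token : Int) (max_seq_len : Int) (context_len : Int) : List (List Int × List Int) :=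
  let pred_len := max_seq_len - context_len + 1
  let first := min max_seq_len (token_list.length : Int)
  let context := PySem.List.slice token_list none (some first)
  let rest := PySem.List.slice token_list (some first) none
  (prefix_token :: PySem.List.slice token_list none (some (first - 1)), context) ::
  grtwStream max_seq_len pred_len context rest rest.length

-- ===== PRECONDITION & SPEC =====
-- A asserts 1 <= context_len <= max_seq_len and raises AssertionError otherwise; Pre_ is exactly that.
def Pre_get_rolling_token_windows (token_list : List Int) (prefix_token : Int) (max_seq_len : Int) (context_len : Int) : Prop :=
  1 ≤ context_len ∧ context_len ≤ max_seq_len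
instance (token_list : List Int) (prefix_token : Int) (max_seq_len : Int) (context_len : Int) : Decidable (Pre_get_rolling_token_windows token_list prefix_token max_seq_len context_len) := by unfold Pre_get_rolling_token_windows; infer_instance

def pvWitness_get_rolling_token_windows : List Int × Int × Int × Int := ([1, 2, 3, 4, 5], 0, 3, 2)

def Spec_get_rolling_token_windows (token_list : List Int) (prefix_token : Int) (max_seq_len : Int) (context_len : Int) (out : List (List Int × List Int)) : Prop := out = get_rolling_token_windows_alt token_list prefix_token max_seq_len context_len
instance (token_list : List Int) (prefix_token : Int) (max_seq_len : Int) (context_len : Int) (out : List (List Int × List Int)) : Decidable (Spec_get_rolling_token_windows token_list prefix_token max_seq_len context_len out) := by unfold Spec_get_rolling_token_windows; infer_instance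

-- ===== CLAIM (what is proved, stated in full; the proofs are below) =====
def Claim_equal_get_rolling_token_windows : Prop := ∀ (token_list : List Int) (prefix_token : Int) (max_seq_len : Int) (context_len : Int), Dom_get_rolling_token_windows token_list prefix_token max_seq_len context_len → Pre_get_rolling_token_windows token_list prefix_token max_seq_len context_len → Spec_get_rolling_token_windows token_list prefix_token max_seq_len context_len (get_rolling_token_windows token_list prefix_token max_seq_len context_len)

-- ===== LEMMAS AND PROOFS =====

-- Both loops, once their invariants are phrased over absolute positions, produce the
-- window at position p followed by the windows from position min (p+pred_len) n onward;
-- we prove each loop equal to a common closed description and chain the two.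

theorem grtwStream_nil (msl pl : Int) (c : List Int) (fuel : Nat) :
    grtwStream msl pl c [] fuel = [] := by
  cases fuel <;> simp [grtwStream]

-- contiguous segments concatenate
theorem seg_append (l : List Int) (a b c : Nat) (hab : a ≤ b) (hbc : b ≤ c) :
    (l.drop a).take (b - a) ++ (l.drop b).take (c - b) = (l.drop a).take (c - a) := by
  rw [show c - a = (b - a) + (c - b) by omega, List.take_add, List.drop_drop,
     show a + (b - a) = b by omega]

theorem grtwLoop_fuel (tl : List Int) (msl pl : Int) (hpl : 0 < pl) :
    ∀ (f1 : Nat) (f2 : Nat) (p : Int), (tl.length : Int) - p ≤ (f1 : Int) →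
      (tl.length : Int) - p ≤ (f2 : Int) →
    grtwLoop tl msl pl p f1 = grtwLoop tl msl pl p f2 := by
  intro f1
  induction f1 with
  | zero =>
    intro f2 p h1 h2
    have hnl : ¬ p < (tl.length : Int) := by push_cast at h1; omega
    cases f2 <;> simp [grtwLoop, hnl]
  | succ k ih =>
    intro f2 p h1 h2
    by_cases hlt : p < (tl.length : Int)
    · cases f2 with
      | zero => push_cast at h2; omega
      | succ m =>
        simp only [grtwLoop, if_pos hlt]
        congr 1
        exact ih m (p + min ((tl.length : Int) - p) pl)
          (by push_cast at h1 ⊢; omega) (by push_cast at h2 ⊢; omega)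
    · cases f2 <;> rw [grtwLoop, grtwLoop] <;> simp [hlt]

theorem grtwStream_eq (tl : List Int) (msl pl : Int) (hpl : 0 < pl) (hmsl : 0 < msl) :
    ∀ (fuel : Nat) (p : Int), msl ≤ p → p ≤ (tl.length : Int) →
      (tl.length : Int) - p ≤ (fuel : Int) →
    grtwStream msl pl ((tl.drop (p - msl).toNat).take msl.toNat) (tl.drop p.toNat) fuel =
      grtwLoop tl msl pl p fuel := by
  intro fuel
  induction fuel with
  | zero =>
    intro p hmp hpn hf
    simp [grtwStream, grtwLoop]
  | succ k ih =>
    intro p hmp hpn hf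
    by_cases hlt : p < (tl.length : Int)
    · have hrest : tl.drop p.toNat ≠ [] := by
        simp only [ne_eq, List.drop_eq_nil_iff]
        omega
      rw [grtwStream, grtwLoop, if_neg hrest, if_pos hlt]
      obtain ⟨e, he⟩ : ∃ e : Int, e = min (p + pl) (tl.length : Int) := ⟨_, rfl⟩
      have hwpl : min ((tl.length : Int) - p) pl = e - p := by omega
      have hep : p < e := by omega
      have hen : e ≤ (tl.length : Int) := by omega
      -- chunk = tl[p:e]
      have hchunk : PySem.List.slice (tl.drop p.toNat) none (some pl) =
          (tl.drop p.toNat).take (e.toNat - p.toNat) := by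
        rw [PySem.List.slice_to _ (by omega : (0:Int) ≤ pl)]
        rcases le_or_gt (p + pl) (tl.length : Int) with h | h
        · congr 1; omega
        · apply List.take_eq_take_iff.mpr
          simp only [List.length_drop]
          omega
      -- rest' = tl[e:]
      have hrest' : PySem.List.slice (tl.drop p.toNat) (some pl) none = tl.drop e.toNat := by
        rw [PySem.List.slice_from _ (by omega : (0:Int) ≤ pl), List.drop_drop]
        rcases le_or_gt (p + pl) (tl.length : Int) with h | h
        · congr 1; omega
        · rw [List.drop_eq_nil_iff.mpr, List.drop_eq_nil_iff.mpr] <;> omega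
      -- full = tl[p-msl : e]
      have hfull : (tl.drop (p - msl).toNat).take msl.toNat ++
          (tl.drop p.toNat).take (e.toNat - p.toNat) =
          (tl.drop (p - msl).toNat).take (e.toNat - (p - msl).toNat) := by
        have hseg := seg_append tl (p - msl).toNat p.toNat e.toNat (by omega) (by omega)
        rw [show p.toNat - (p - msl).toNat = msl.toNat by omega] at hseg
        exact hseg
      obtain ⟨a, ha⟩ : ∃ a : Nat, a = (p - msl).toNat := ⟨_, rfl⟩
      rw [← ha] at hfull
      have hlenfull : ((tl.drop a).take (e.toNat - a)).length = e.toNat - a := by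
        simp only [List.length_take, List.length_drop]
        omega
      -- full[:-1]
      have hdl : PySem.List.slice ((tl.drop a).take (e.toNat - a)) none (some (-1)) =
          (tl.drop a).take (e.toNat - a - 1) := by
        rw [PySem.List.slice_to_neg_one, List.dropLast_eq_take, hlenfull, List.take_take]
        congr 1
        omega
      -- negative start -msl rewritten over a natural k
      have hneg : -msl = -(msl.toNat : Int) := by omega
      -- full[:-1][-msl:]
      have hwin : PySem.List.slice ((tl.drop a).take (e.toNat - a - 1)) (some (-msl)) none =
          (tl.drop (e.toNat - 1 - msl.toNat)).take msl.toNat := by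
        rw [hneg, PySem.List.slice_from_neg_natCast _ _ (by omega)]
        rw [List.drop_take, List.length_take, List.length_drop, List.drop_drop]
        rw [show min (e.toNat - a - 1) (tl.length - a) = e.toNat - a - 1 by omega,
           show e.toNat - a - 1 - (e.toNat - a - 1 - msl.toNat) = msl.toNat by omega,
           show a + (e.toNat - a - 1 - msl.toNat) = e.toNat - 1 - msl.toNat by omega]
      -- full[-msl:]
      have hctx : PySem.List.slice ((tl.drop a).take (e.toNat - a)) (some (-msl)) none =
          (tl.drop (e.toNat - msl.toNat)).take msl.toNat := by
        rw [hneg, PySem.List.slice_from_neg_natCast _ _ (by omega)]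
        rw [List.drop_take, List.length_take, List.length_drop, List.drop_drop]
        rw [show min (e.toNat - a) (tl.length - a) = e.toNat - a by omega,
           show e.toNat - a - (e.toNat - a - msl.toNat) = msl.toNat by omega,
           show a + (e.toNat - a - msl.toNat) = e.toNat - msl.toNat by omega]
      -- A's window slices in drop/take form
      have hA1 : PySem.List.slice tl (some (e - msl - 1)) (some (e - 1)) =
          (tl.drop (e.toNat - 1 - msl.toNat)).take msl.toNat := by
        rw [PySem.List.slice_toNat _ (by omega : (0:Int) ≤ e - msl - 1) (by omega : (0:Int) ≤ e - 1)]
        rw [show (e - msl - 1).toNat = e.toNat - 1 - msl.toNat by omega,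
           show (e - 1).toNat - (e.toNat - 1 - msl.toNat) = msl.toNat by omega]
      have hA2 : PySem.List.slice tl (some (e - (e - p))) (some e) =
          (tl.drop p.toNat).take (e.toNat - p.toNat) := by
        rw [show e - (e - p) = p by omega]
        rw [PySem.List.slice_toNat _ (by omega : (0:Int) ≤ p) (by omega : (0:Int) ≤ e)]
      have hwe : p + (e - p) = e := by omega
      have htail := ih e (by omega) (by omega) (by push_cast at hf ⊢; omega)
      rw [show (e - msl).toNat = e.toNat - msl.toNat by omega] at htail
      rw [← ha]
      simp only [hchunk, hrest', hfull, hdl, hwin, hctx, hwpl, hwe, hA1, hA2, htail]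
    · have hrest : tl.drop p.toNat = [] := by
        rw [List.drop_eq_nil_iff]
        omega
      rw [hrest, grtwStream_nil, grtwLoop, if_neg hlt]

-- ===== VERDICT (by name: the statement is the Claim_ definition above) =====
theorem get_rolling_token_windows_spec : Claim_equal_get_rolling_token_windows := by
  intro tl pt msl cl _ hpre
  obtain ⟨h1, h2⟩ := hpre
  unfold Spec_get_rolling_token_windows get_rolling_token_windows get_rolling_token_windows_alt
  simp only []
  obtain ⟨first, hfirst⟩ : ∃ f : Int, f = min msl (tl.length : Int) := ⟨_, rfl⟩
  rw [← hfirst]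
  congr 1
  rcases le_or_gt (tl.length : Int) msl with hcase | hcase
  · -- everything fits in the first window: both loops are empty
    have hrest : PySem.List.slice tl (some first) none = [] := by
      rw [PySem.List.slice_from _ (by omega : (0:Int) ≤ first), List.drop_eq_nil_iff]
      omega
    rw [hrest, grtwStream_nil]
    have hnl : ¬ first < (tl.length : Int) := by omega
    cases htl : tl.length <;> simp [grtwLoop, hnl]
  · -- tl.length > msl: first = msl; apply the loop equivalence
    have hf : first = msl := by omega
    have hctx : PySem.List.slice tl none (some first) =
        (tl.drop (first - msl).toNat).take msl.toNat := by
      rw [hf, PySem.List.slice_to _ (by omega : (0:Int) ≤ msl)]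
      simp
    have hrest : PySem.List.slice tl (some first) none = tl.drop first.toNat := by
      rw [PySem.List.slice_from _ (by omega : (0:Int) ≤ first)]
    rw [hctx, hrest]
    have hlen : (tl.drop first.toNat).length = ((tl.length : Int) - first).toNat := by
      simp only [List.length_drop]
      omega
    rw [hlen]
    rw [grtwLoop_fuel tl msl (msl - cl + 1) (by omega) tl.length (((tl.length : Int) - first).toNat) first (by omega) (by omega)]
    exact (grtwStream_eq tl msl (msl - cl + 1) (by omega) (by omega) (((tl.length : Int) - first).toNat) first (by omega) (by omega) (by omega)).symm
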